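-- pv_equiv track=rewrite | github.com/LetsTalktotheMoon/workpipe | match_pipe/units.py | _group_hits_by_connector
-- ===== SOURCE A (Python) =====
-- def _connector_between(text: str, left_end: int, right_start: int) -> str:
--     between = text[left_end:right_start]
--     if " and / or " in between or " and/or " in between:
--         return "OR"
--     if " or " in between:
--         return "OR"
--     if " and " in between or " plus " in between:
--         return "AND"
--     return ""
--
-- def _group_hits_by_connector(
--     normalized_text: str,
--     hits: list[tuple[int, int, str, str]],
-- ) -> list[tuple[str, list[str]]]:
--     grouped: list[tuple[str, list[str]]] = []
--     i = 0
--     while i < len(hits):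
--         start, end, canonical_id, content_type = hits[i]
--         members = [canonical_id]
--         logic_type = ""
--         j = i + 1
--         last_end = end
--         while j < len(hits):
--             next_start, next_end, next_canonical, next_type = hits[j]
--             if next_type != content_type:
--                 break
--             if content_type == "experience":
--                 break
--             connector = _connector_between(normalized_text, last_end, next_start)
--             if not connector:
--                 break
--             if not logic_type:
--                 logic_type = connector
--             if connector != logic_type:
--                 break
--             members.append(next_canonical)
--             last_end = next_end
--             j += 1
--         if logic_type and len(members) >= 2:
--             grouped.append((logic_type, members))
--             i = j
--         else:
--             i += 1
--     return grouped
-- ===== SOURCE B (Python) =====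
-- def _connector_between(text: str, left_end: int, right_start: int) -> str:
--     between = text[left_end:right_start]
--     if " and / or " in between or " and/or " in between:
--         return "OR"
--     if " or " in between:
--         return "OR"
--     if " and " in between or " plus " in between:
--         return "AND"
--     return ""
--
-- def _group_hits_by_connector(
--     normalized_text: str,
--     hits: list[tuple[int, int, str, str]],
-- ) -> list[tuple[str, list[str]]]:
--     # Pass 1: connector after each hit ("" for the last one, for type
--     # mismatches and for 'experience' hits).
--     pairs = []
--     for (_, end, cid, ct), (nxt_start, _, _, nxt_ct) in zip(hits, hits[1:]):
--         conn = ""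
--         if ct == nxt_ct and ct != "experience":
--             conn = _connector_between(normalized_text, end, nxt_start)
--         pairs.append((cid, conn))
--     if hits:
--         pairs.append((hits[-1][2], ""))
--     # Pass 2: segment into maximal runs of one equal non-empty connector.
--     grouped = []
--     i = 0
--     n = len(pairs)
--     while i < n:
--         cid, c = pairs[i]
--         if not c:
--             i += 1
--             continue
--         members = [cid]
--         i += 1
--         while True:
--             cid2, c2 = pairs[i]
--             members.append(cid2)
--             i += 1
--             if c2 != c:
--                 break
--         grouped.append((c, members))
--     return grouped
-- ===== Notes on version B (the rewrite author's own statement) =====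
-- stated objective: alternative
-- what changed: B splits A's nested index-jumping loop into two flat passes: first compute the connector after each hit (empty on type mismatch or 'experience'), then segment the (id, connector) pairs into maximal runs of one equal non-empty connector.
import Mathlib
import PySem

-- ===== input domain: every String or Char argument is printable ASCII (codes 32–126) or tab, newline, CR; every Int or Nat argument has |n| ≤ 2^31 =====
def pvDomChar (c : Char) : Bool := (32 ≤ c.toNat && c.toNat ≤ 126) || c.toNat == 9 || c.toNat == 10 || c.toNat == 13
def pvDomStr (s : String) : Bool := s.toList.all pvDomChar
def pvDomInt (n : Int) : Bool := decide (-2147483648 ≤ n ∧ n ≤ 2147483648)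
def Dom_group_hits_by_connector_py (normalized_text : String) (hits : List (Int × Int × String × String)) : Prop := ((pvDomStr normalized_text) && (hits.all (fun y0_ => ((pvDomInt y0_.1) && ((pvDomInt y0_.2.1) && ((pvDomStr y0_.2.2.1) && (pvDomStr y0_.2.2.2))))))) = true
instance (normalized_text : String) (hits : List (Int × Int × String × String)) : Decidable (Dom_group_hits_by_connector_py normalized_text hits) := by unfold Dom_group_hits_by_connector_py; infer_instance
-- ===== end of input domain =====

-- B separates connector computation from run segmentation (two flat passes) instead of
-- A's nested index-jumping loop; objective: alternative decomposition (same cost).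

-- ===== PORT A =====
-- _connector_between (shared helper of both Pythons, transliterated once)
def connectorBetween (text : String) (left_end right_start : Int) : String :=
  let between := PySem.Str.slice text (some left_end) (some right_start)
  if PySem.Str.isIn " and / or " between || PySem.Str.isIn " and/or " between then "OR"
  else if PySem.Str.isIn " or " between then "OR"
  else if PySem.Str.isIn " and " between || PySem.Str.isIn " plus " between then "AND"
  else ""

-- A's inner while loop: state (last_end, logic_type, members) over the remaining hits;
-- returns (logic_type, members, remaining hits at the break point)
def aInner (text : String) (ct : String) :
    Int → String → List String → List (Int × Int × String × String) →
    String × List String × List (Int × Int × String × String)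
  | _, lt, members, [] => (lt, members, [])
  | last_end, lt, members, h :: tl =>
    if h.2.2.2 ≠ ct then (lt, members, h :: tl)
    else if ct = "experience" then (lt, members, h :: tl)
    else
      let connector := connectorBetween text last_end h.1
      if connector = "" then (lt, members, h :: tl)
      else
        let lt' := if lt = "" then connector else lt
        if connector ≠ lt' then (lt', members, h :: tl)
        else aInner text ct h.2.1 lt' (members ++ [h.2.2.1]) tl

theorem aInner_rem_le (text ct : String) (e : Int) (lt : String) (mem : List String)
    (l : List (Int × Int × String × String)) :
    (aInner text ct e lt mem l).2.2.length ≤ l.length := by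
  induction l generalizing e lt mem with
  | nil => simp [aInner]
  | cons h tl ih =>
    simp only [aInner]
    split_ifs <;> simp <;> exact le_trans (ih _ _ _) (Nat.le_succ _)

-- A's outer while loop, recursion on the remaining hits
def group_hits_by_connector_py (normalized_text : String) (hits : List (Int × Int × String × String)) : List (String × List String) :=
  match hits with
  | [] => []
  | h :: rest =>
    let r := aInner normalized_text h.2.2.2 h.2.1 "" [h.2.2.1] rest
    if r.1 ≠ "" ∧ 2 ≤ r.2.1.length then
      (r.1, r.2.1) :: group_hits_by_connector_py normalized_text r.2.2
    else
      group_hits_by_connector_py normalized_text rest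
termination_by hits.length
decreasing_by
  · exact Nat.lt_succ_of_le (aInner_rem_le _ _ _ _ _ _)
  · exact Nat.lt_succ_self _

-- ===== PORT B =====
-- connector stored after a hit, given the next hit ("" on type mismatch / experience)
def connOf (text : String) (a b : Int × Int × String × String) : String :=
  if a.2.2.2 = b.2.2.2 ∧ a.2.2.2 ≠ "experience" then connectorBetween text a.2.1 b.1 else ""

-- pass 1: each hit's canonical id paired with the connector to the next hit
def mkPairs (text : String) : List (Int × Int × String × String) → List (String × String)
  | [] => []
  | [h] => [(h.2.2.1, "")]
  | h :: h' :: tl => (h.2.2.1, connOf text h h') :: mkPairs text (h' :: tl)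

-- pass 2 helper: the inner while-True loop — consume members while the connector stays c
def takeRun (c : String) : List (String × String) → List String × List (String × String)
  | [] => ([], [])
  | (cid, c') :: tl =>
    if c' = c then
      let p := takeRun c tl
      (cid :: p.1, p.2)
    else ([cid], tl)

theorem takeRun_rem_le (c : String) (l : List (String × String)) :
    (takeRun c l).2.length ≤ l.length := by
  induction l with
  | nil => simp [takeRun]
  | cons h tl ih =>
    simp only [takeRun]
    split_ifs <;> simp
    exact le_trans ih (Nat.le_succ _)

-- pass 2: segment the pair list into maximal runs of one equal non-empty connector
def altSeg : List (String × String) → List (String × List String)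
  | [] => []
  | (cid, c) :: tl =>
    if c = "" then altSeg tl
    else
      let p := takeRun c tl
      (c, cid :: p.1) :: altSeg p.2
termination_by l => l.length
decreasing_by
  · exact Nat.lt_succ_self _
  · exact Nat.lt_succ_of_le (takeRun_rem_le _ _)

def group_hits_by_connector_py_alt (normalized_text : String) (hits : List (Int × Int × String × String)) : List (String × List String) :=
  altSeg (mkPairs normalized_text hits)

-- ===== PRECONDITION & SPEC =====
def Spec_group_hits_by_connector_py (normalized_text : String) (hits : List (Int × Int × String × String)) (out : List (String × List String)) : Prop := out = group_hits_by_connector_py_alt normalized_text hits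
instance (normalized_text : String) (hits : List (Int × Int × String × String)) (out : List (String × List String)) : Decidable (Spec_group_hits_by_connector_py normalized_text hits out) := by unfold Spec_group_hits_by_connector_py; infer_instance

-- ===== CLAIM (what is proved, stated in full; the proofs are below) =====
def Claim_equal_group_hits_by_connector_py : Prop := ∀ (normalized_text : String) (hits : List (Int × Int × String × String)), Dom_group_hits_by_connector_py normalized_text hits → Spec_group_hits_by_connector_py normalized_text hits (group_hits_by_connector_py normalized_text hits)

-- ===== LEMMAS AND PROOFS =====

-- B-side helper mirroring aInner on the hits list (bridge between the two ports)
def takeRunH (text c : String) (prev : Int × Int × String × String) :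
    List (Int × Int × String × String) →
    List String × List (Int × Int × String × String)
  | [] => ([], [])
  | x :: xs =>
    if connOf text prev x = c then
      let p := takeRunH text c x xs
      (x.2.2.1 :: p.1, p.2)
    else ([], x :: xs)

theorem takeRunH_rem_le (text c : String) (prev : Int × Int × String × String)
    (l : List (Int × Int × String × String)) :
    (takeRunH text c prev l).2.length ≤ l.length := by
  induction l generalizing prev with
  | nil => simp [takeRunH]
  | cons x xs ih =>
    simp only [takeRunH]
    split_ifs <;> simp
    exact le_trans (ih x) (Nat.le_succ _)

-- takeRun on the pair list computes takeRunH on the hit list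
theorem takeRun_eq_takeRunH (text c : String) (hc : c ≠ "")
    (x : Int × Int × String × String) (xs : List (Int × Int × String × String)) :
    takeRun c (mkPairs text (x :: xs)) =
      (x.2.2.1 :: (takeRunH text c x xs).1, mkPairs text (takeRunH text c x xs).2) := by
  induction xs generalizing x with
  | nil => simp [mkPairs, takeRun, takeRunH, hc]
  | cons x' xs' ih =>
    simp only [mkPairs, takeRun, takeRunH]
    by_cases h : connOf text x x' = c
    · simp [h, ih x']
    · simp [h]

-- A's inner loop, once a connector c is fixed, is takeRunH
theorem aInner_eq_takeRunH (text ct c : String) (hc : c ≠ "") (hct : ct ≠ "experience")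
    (prev : Int × Int × String × String) (hty : prev.2.2.2 = ct)
    (mem : List String) (l : List (Int × Int × String × String)) :
    aInner text ct prev.2.1 c mem l =
      (c, mem ++ (takeRunH text c prev l).1, (takeRunH text c prev l).2) := by
  induction l generalizing prev mem with
  | nil => simp [aInner, takeRunH]
  | cons x xs ih =>
    by_cases h1 : x.2.2.2 = ct
    · have hconn : connOf text prev x = connectorBetween text prev.2.1 x.1 := by
        simp [connOf, hty, h1, hct]
      by_cases h2 : connectorBetween text prev.2.1 x.1 = c
      · have hne : connectorBetween text prev.2.1 x.1 ≠ "" := h2 ▸ hc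
        simp only [aInner, takeRunH, hconn, h2, h1, ne_eq, not_true_eq_false,
          if_false, if_neg hct]
        simp [hc, ih x h1]
      · simp only [aInner, takeRunH, hconn, if_neg h2, h1, ne_eq, not_true_eq_false,
          if_false, if_neg hct, if_neg hc]
        by_cases h3 : connectorBetween text prev.2.1 x.1 = ""
        · simp [h3]
        · simp [h3, h2]
    · have hconn : connOf text prev x = "" := by
        simp only [connOf, hty]
        rw [if_neg]
        rintro ⟨he, -⟩; exact h1 he.symm
      simp [aInner, takeRunH, hconn, h1, Ne.symm hc]
-- main equivalence, strong induction on the number of hits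
theorem aOuter_eq_alt (text : String) :
    ∀ (hits : List (Int × Int × String × String)),
      group_hits_by_connector_py text hits = altSeg (mkPairs text hits) := by
  suffices H : ∀ (n : ℕ) (hits : List (Int × Int × String × String)), hits.length ≤ n →
      group_hits_by_connector_py text hits = altSeg (mkPairs text hits) from
    fun hits => H hits.length hits le_rfl
  intro n
  induction n with
  | zero =>
    intro hits hlen
    have : hits = [] := List.eq_nil_of_length_eq_zero (Nat.le_zero.mp hlen)
    subst this
    simp [group_hits_by_connector_py, mkPairs, altSeg]
  | succ n ih =>
    intro hits hlen
    match hits with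
    | [] => simp [group_hits_by_connector_py, mkPairs, altSeg]
    | [h] =>
      simp [group_hits_by_connector_py, aInner, mkPairs, altSeg]
    | h :: h' :: tl =>
      by_cases hc0 : connOf text h h' = ""
      · -- the very first connector is empty: A breaks at once, B skips the first pair
        have hbreak : aInner text h.2.2.2 h.2.1 "" [h.2.2.1] (h' :: tl)
            = ("", [h.2.2.1], h' :: tl) := by
          simp only [connOf] at hc0
          by_cases e1 : h.2.2.2 = h'.2.2.2
          · by_cases e2 : h.2.2.2 = "experience"
            · simp [aInner, e2]
            · have : connectorBetween text h.2.1 h'.1 = "" := by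
                rw [if_pos ⟨e1, e2⟩] at hc0; exact hc0
              simp [aInner, this]
          · have hne : h'.2.2.2 ≠ h.2.2.2 := fun e => e1 e.symm
            simp only [aInner, ne_eq]
            rw [if_pos hne]
        rw [group_hits_by_connector_py]
        simp only [hbreak, ne_eq, not_true_eq_false, false_and, if_false]
        rw [ih (h' :: tl) (by simpa using Nat.lt_succ_iff.mp (by simpa using hlen))]
        simp [mkPairs, altSeg, hc0]
      · -- first connector non-empty: a run starts, handled by the takeRun lemmas
        have e1 : h.2.2.2 = h'.2.2.2 ∧ h.2.2.2 ≠ "experience" := by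
          by_contra hK
          exact hc0 (by simp [connOf, if_neg hK])
        have hcb : connectorBetween text h.2.1 h'.1 = connOf text h h' := by
          unfold connOf
          rw [if_pos e1]
        have hstep : aInner text h.2.2.2 h.2.1 "" [h.2.2.1] (h' :: tl)
            = aInner text h.2.2.2 h'.2.1 (connOf text h h') [h.2.2.1, h'.2.2.1] tl := by
          simp [aInner, ← e1.1, e1.2, hcb, hc0]
        have hty' : h'.2.2.2 = h.2.2.2 := e1.1.symm
        have hIn := aInner_eq_takeRunH text h.2.2.2 (connOf text h h') hc0 e1.2 h' hty'
          [h.2.2.1, h'.2.2.1] tl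
        rw [group_hits_by_connector_py]
        simp only [hstep, hIn]
        rw [if_pos ⟨hc0, by simp⟩]
        have hrem : (takeRunH text (connOf text h h') h' tl).2.length ≤ n := by
          calc (takeRunH text (connOf text h h') h' tl).2.length
              ≤ tl.length := takeRunH_rem_le _ _ _ _
            _ ≤ n := by simpa using Nat.lt_succ_iff.mp (by simp at hlen; omega)
        rw [ih _ hrem]
        conv_rhs => rw [mkPairs]
        rw [altSeg]
        simp only [if_neg hc0, takeRun_eq_takeRunH text _ hc0 h' tl]
        simp

-- ===== VERDICT (by name: the statement is the Claim_ definition above) =====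
theorem group_hits_by_connector_py_spec : Claim_equal_group_hits_by_connector_py := by
  intro text hits _
  unfold Spec_group_hits_by_connector_py group_hits_by_connector_py_alt
  exact aOuter_eq_alt text hits
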